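-- pv_equiv track=rewrite | github.com/amirhh00/Algorithm | src/week7/practice/1.py | greedySubsetSum
-- ===== SOURCE A (Python) =====
-- def evaluate(U, S, t):
--     return pow(t - sum([x * y for x, y in zip(U, S)]), 2)
--
-- def greedySubsetSum(U, S, t):
--     best = evaluate(U, S, t)
--     bestItem = -1
--     for i in range(len(S)):
--         S_ = S.copy()
--         S_[i] = 1
--         if evaluate(U, S_, t) < best:
--             best = evaluate(U, S_, t)
--             bestItem = i
--     if bestItem == -1:
--         return False
--     S[bestItem] = 1
--     return True
-- ===== SOURCE B (Python) =====
-- def greedySubsetSum(U, S, t):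
--     # One pass: precompute the residual r = t - dot(U, S); flipping S[i] to 1
--     # changes the dot product by U[i]*(1 - S[i]), so each candidate error is O(1).
--     r = t - sum(u * s for u, s in zip(U, S))
--     bestE = r * r
--     bestI = -1
--     for i, s in enumerate(S):
--         d = U[i] * (1 - s) if i < len(U) else 0
--         e = (r - d) ** 2
--         if e < bestE:
--             bestE, bestI = e, i
--     if bestI == -1:
--         return False
--     S[bestI] = 1
--     return True
-- ===== Notes on version B (the rewrite author's own statement) =====
-- stated objective: faster
-- what changed: Instead of copying S and recomputing the full dot product for every candidate index, B computes the residual t - dot(U,S) once and derives each candidate's squared error in O(1) from the incremental change U[i]*(1-S[i]).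
import Mathlib
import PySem

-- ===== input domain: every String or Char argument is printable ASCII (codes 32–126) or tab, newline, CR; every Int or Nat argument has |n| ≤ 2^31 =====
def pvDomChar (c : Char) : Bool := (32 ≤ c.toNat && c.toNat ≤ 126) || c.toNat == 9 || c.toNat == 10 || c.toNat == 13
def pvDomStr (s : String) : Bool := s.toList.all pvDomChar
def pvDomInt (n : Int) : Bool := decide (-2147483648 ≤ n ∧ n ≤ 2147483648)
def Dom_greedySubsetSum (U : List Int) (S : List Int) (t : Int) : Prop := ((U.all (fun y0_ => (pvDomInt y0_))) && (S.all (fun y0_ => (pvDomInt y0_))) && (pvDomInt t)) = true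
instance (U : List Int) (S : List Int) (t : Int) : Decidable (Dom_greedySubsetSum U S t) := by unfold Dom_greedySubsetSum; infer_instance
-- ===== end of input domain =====

-- B replaces A's quadratic re-evaluation (a fresh dot product per candidate) by one precomputed
-- residual r = t - dot(U,S) and an O(1) incremental error per index: objective = faster (asymptotic).
-- Both programs also set S[bestItem] = 1 in place when they return True (same mutation in A and B);
-- the equivalence proved here is about the return value.


-- ===== PORT A =====
-- evaluate(U, S, t) = (t - sum(x*y for zip(U,S)))**2
def pvEvaluate (U : List Int) (S : List Int) (t : Int) : Int :=
  (t - ((U.zip S).map (fun p => p.1 * p.2)).sum) ^ 2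

def greedySubsetSum (U : List Int) (S : List Int) (t : Int) : Bool :=
  let init : Int × Int := (pvEvaluate U S t, -1)      -- best, bestItem
  let st :=
    (PySem.List.pyRange 0 (S.length : Int) 1).foldl
      (fun st i =>
        let S_ := PySem.List.pySetD S i 1             -- S_ = S.copy(); S_[i] = 1
        if pvEvaluate U S_ t < st.1 then (pvEvaluate U S_ t, i) else st)
      init
  if st.2 = -1 then false else true

-- ===== PORT B =====
def greedySubsetSum_alt (U : List Int) (S : List Int) (t : Int) : Bool :=
  let r : Int := t - ((U.zip S).map (fun p => p.1 * p.2)).sum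
  let st :=
    (PySem.List.enumerate S 0).foldl
      (fun st p =>
        let d : Int := if p.1 < (U.length : Int) then PySem.List.pyGetD U p.1 0 * (1 - p.2) else 0
        let e := (r - d) ^ 2
        if e < st.1 then (e, p.1) else st)
      ((r * r, -1) : Int × Int)                        -- bestE, bestI
  if st.2 = -1 then false else true

-- ===== PRECONDITION & SPEC =====
def Spec_greedySubsetSum (U : List Int) (S : List Int) (t : Int) (out : Bool) : Prop := out = greedySubsetSum_alt U S t
instance (U : List Int) (S : List Int) (t : Int) (out : Bool) : Decidable (Spec_greedySubsetSum U S t out) := by unfold Spec_greedySubsetSum; infer_instance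

-- ===== CLAIM (what is proved, stated in full; the proofs are below) =====
def Claim_equal_greedySubsetSum : Prop := ∀ (U : List Int) (S : List Int) (t : Int), Dom_greedySubsetSum U S t → Spec_greedySubsetSum U S t (greedySubsetSum U S t)

-- ===== LEMMAS AND PROOFS =====

-- setting index k of S to 1 shifts the zip-dot-product by U[k]*(1 - S[k]) (0 if U is too short)
theorem pv_dot_set (U S : List Int) (k : Nat) (hk : k < S.length) :
    ((U.zip (S.set k 1)).map (fun p => p.1 * p.2)).sum =
      ((U.zip S).map (fun p => p.1 * p.2)).sum
        + (if k < U.length then U.getD k 0 * (1 - S.getD k 0) else 0) := by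
  induction U generalizing S k with
  | nil => simp
  | cons u us ih =>
    cases S with
    | nil => simp at hk
    | cons s ss =>
      cases k with
      | zero => simp [List.zip_cons_cons]; ring
      | succ k =>
        simp only [List.set_cons_succ, List.zip_cons_cons, List.map_cons, List.sum_cons,
          List.getD_cons_succ, List.length_cons, Nat.succ_lt_succ_iff]
        rw [ih ss k (by simpa using hk)]
        ring

-- enumerate S 0 indexed through List.range
theorem pv_enumerate_eq (S : List Int) :
    PySem.List.enumerate S 0 =
      (List.range S.length).map (fun (k : Nat) => ((k : Int), S.getD k 0)) := by
  have h : ∀ (xs : List Int) (s : Int),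
      PySem.List.enumerate xs s = (List.range xs.length).map (fun (k : Nat) => (s + (k : Int), xs.getD k 0)) := by
    intro xs
    induction xs with
    | nil => intro s; simp [PySem.List.enumerate_nil]
    | cons x xs ih =>
      intro s
      simp only [PySem.List.enumerate_cons, ih (s + 1), List.length_cons, List.range_succ_eq_map,
        List.map_cons, List.map_map]
      congr 1
      · simp
      · apply List.map_congr_left
        intro k _
        simp only [Function.comp]
        congr 1
        push_cast; ring
  simpa using h S 0

theorem greedy_states_eq (U S : List Int) (t : Int) :
    (PySem.List.pyRange 0 (S.length : Int) 1).foldl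
      (fun (st : Int × Int) i =>
        let S_ := PySem.List.pySetD S i 1
        if pvEvaluate U S_ t < st.1 then (pvEvaluate U S_ t, i) else st)
      (pvEvaluate U S t, -1)
    =
    (PySem.List.enumerate S 0).foldl
      (fun (st : Int × Int) p =>
        let d : Int := if p.1 < (U.length : Int) then PySem.List.pyGetD U p.1 0 * (1 - p.2) else 0
        let e := ((t - ((U.zip S).map (fun p => p.1 * p.2)).sum) - d) ^ 2
        if e < st.1 then (e, p.1) else st)
      ((t - ((U.zip S).map (fun p => p.1 * p.2)).sum) * (t - ((U.zip S).map (fun p => p.1 * p.2)).sum), -1) := by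
  set r : Int := t - ((U.zip S).map (fun p => p.1 * p.2)).sum with hr
  rw [pv_enumerate_eq, PySem.List.pyRange_zero_nat, List.foldl_map, List.foldl_map]
  have hinit : pvEvaluate U S t = r * r := by
    simp [pvEvaluate, sq, hr]
  rw [hinit]
  apply PySem.List.foldl_congr_mem
  intro st k hk
  have hkS : k < S.length := List.mem_range.mp hk
  have hA : pvEvaluate U (PySem.List.pySetD S (k : Int) 1) t
      = (r - (if (k : Int) < (U.length : Int) then PySem.List.pyGetD U (k : Int) 0 * (1 - S.getD k 0) else 0)) ^ 2 := by
    rw [PySem.List.pySetD_natCast]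
    simp only [pvEvaluate, pv_dot_set U S k hkS, PySem.List.pyGetD_natCast, Nat.cast_lt]
    congr 1
    split_ifs <;> ring
  simp only [hA]

-- ===== VERDICT (by name: the statement is the Claim_ definition above) =====
theorem greedySubsetSum_spec : Claim_equal_greedySubsetSum := by
  intro U S t _
  unfold Spec_greedySubsetSum greedySubsetSum greedySubsetSum_alt
  simp only []
  rw [greedy_states_eq]
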